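-- pv_equiv track=rewrite | github.com/pauvrepetit/leetcode | others/xh-1.1.py | find_left_repeat_num
-- ===== SOURCE A (Python) =====
-- from typing import List
--
-- def find_left_repeat_num(nums: List[int]) -> List[int]:
--     numShow = {}
--     resList = []
--     i = 0
--     for num in nums:
--         if num in numShow.keys():
--             resList.append(numShow[num])
--         else:
--             numShow[num] = i
--             resList.append(-1)
--         i += 1
--     return resList
-- ===== SOURCE B (Python) =====
-- def find_left_repeat_num(nums):
--     # backward pass: last write wins, so first[v] ends as v's FIRST index
--     first = {}
--     for i, num in reversed(list(enumerate(nums))):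
--         first[num] = i
--     # forward pass: first occurrence reports -1, later ones report the stored index
--     return [-1 if first[num] == i else first[num] for i, num in enumerate(nums)]
-- ===== Notes on version B (the rewrite author's own statement) =====
-- stated objective: alternative
-- what changed: Replaces A's single interleaved loop (membership test + conditional dict update while emitting) with two separate passes: a backward pass that builds the first-occurrence table by unconditional overwrite, then a forward comprehension that reads the finished table.
import Mathlib
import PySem

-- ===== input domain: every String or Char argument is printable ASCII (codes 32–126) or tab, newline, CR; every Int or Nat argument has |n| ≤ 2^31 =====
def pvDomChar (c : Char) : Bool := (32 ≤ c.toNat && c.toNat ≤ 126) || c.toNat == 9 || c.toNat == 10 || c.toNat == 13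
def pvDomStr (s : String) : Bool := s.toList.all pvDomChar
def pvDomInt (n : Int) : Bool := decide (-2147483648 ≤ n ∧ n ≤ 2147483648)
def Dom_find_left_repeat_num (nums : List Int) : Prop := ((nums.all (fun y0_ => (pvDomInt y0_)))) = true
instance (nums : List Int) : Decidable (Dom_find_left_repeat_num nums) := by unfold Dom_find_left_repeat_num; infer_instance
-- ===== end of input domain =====

-- B replaces A's interleaved loop with two separate passes (backward table build by
-- overwrite, then a forward read-only pass); same O(n) cost, different decomposition.

-- ===== PORT A =====
-- state = (numShow, resList, i); 'num in numShow.keys()' is the contains test,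
-- 'numShow[num]' is getD (the key is present on that branch, so getD is exact).
def find_left_repeat_num (nums : List Int) : List Int :=
  (nums.foldl
    (fun (st : PySem.Dict Int Int × List Int × Int) num =>
      if st.1.contains num then
        (st.1, st.2.1 ++ [st.1.getD num 0], st.2.2 + 1)
      else
        (st.1.insert num st.2.2, st.2.1 ++ [(-1 : Int)], st.2.2 + 1))
    (PySem.Dict.empty, [], 0)).2.1

-- ===== PORT B =====
-- 'first[num]' is getD (every num of nums is a key of first, so getD is exact).
def find_left_repeat_num_alt (nums : List Int) : List Int :=
  let first := ((PySem.List.enumerate nums).reverse).foldl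
    (fun (d : PySem.Dict Int Int) p => d.insert p.2 p.1) PySem.Dict.empty
  (PySem.List.enumerate nums).map
    (fun p => if first.getD p.2 0 = p.1 then (-1 : Int) else first.getD p.2 0)

-- ===== PRECONDITION & SPEC =====
def Spec_find_left_repeat_num (nums : List Int) (out : List Int) : Prop := out = find_left_repeat_num_alt nums
instance (nums : List Int) (out : List Int) : Decidable (Spec_find_left_repeat_num nums out) := by unfold Spec_find_left_repeat_num; infer_instance

-- ===== CLAIM (what is proved, stated in full; the proofs are below) =====
def Claim_equal_find_left_repeat_num : Prop := ∀ (nums : List Int), Dom_find_left_repeat_num nums → Spec_find_left_repeat_num nums (find_left_repeat_num nums)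

-- ===== LEMMAS AND PROOFS =====

-- reference: value emitted for each remaining element, given the already-seen prefix p
def pvRef : List Int → List Int → List Int
  | [], _ => []
  | x :: xs, p =>
      (match List.idxOf? x p with
       | some k => (k : Int)
       | none => (-1 : Int)) :: pvRef xs (p ++ [x])

theorem pv_idx_lt {p : List Int} {x : Int} {k : Nat}
    (h : List.idxOf? x p = some k) : k < p.length := by
  rw [← PySem.List.index?_eq_idxOf?] at h
  obtain ⟨hk, -, -⟩ := PySem.List.getElem_of_index?_eq_some h
  exact hk

theorem pv_idx_append_singleton (p : List Int) (x v : Int) :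
    List.idxOf? v (p ++ [x]) =
      if v ∈ p then List.idxOf? v p
      else if v = x then some p.length else none := by
  rw [← PySem.List.index?_eq_idxOf?, ← PySem.List.index?_eq_idxOf?]
  by_cases hv : v ∈ p
  · simp only [hv, if_true]
    exact PySem.List.index?_append_of_mem [x] hv
  · by_cases hvx : v = x
    · subst hvx
      simp only [hv, if_false, if_true]
      exact PySem.List.index?_append_singleton_self p v hv
    · simp only [hv, if_false, hvx]
      rw [PySem.List.index?_eq_none_iff]
      simp [hv, hvx]

-- A's loop, relative to an arbitrary seen-prefix p
theorem pvA_inv (t : List Int) :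
    ∀ (p res : List Int) (d : PySem.Dict Int Int),
      (∀ v, d.get? v = (List.idxOf? v p).map (fun k => (k : Int))) →
      (t.foldl
        (fun (st : PySem.Dict Int Int × List Int × Int) num =>
          if st.1.contains num then
            (st.1, st.2.1 ++ [st.1.getD num 0], st.2.2 + 1)
          else
            (st.1.insert num st.2.2, st.2.1 ++ [(-1 : Int)], st.2.2 + 1))
        (d, res, (p.length : Int))).2.1 = res ++ pvRef t p := by
  induction t with
  | nil => intro p res d _; simp [pvRef]
  | cons x xs ih =>
    intro p res d hd
    have hc : d.contains x = (List.idxOf? x p).isSome := by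
      rw [PySem.Dict.contains_eq_isSome_get?, hd x]
      cases List.idxOf? x p <;> rfl
    have hlen : (p.length : Int) + 1 = ((p ++ [x]).length : Int) := by
      simp
    simp only [List.foldl_cons]
    cases hix : List.idxOf? x p with
    | some k =>
      have hcx : d.contains x = true := by rw [hc, hix]; rfl
      have hgd : d.getD x 0 = (k : Int) := by
        rw [PySem.Dict.getD_eq_get?_getD, hd x, hix]; rfl
      have hmem : x ∈ p := by
        rw [← PySem.List.index?_isSome_iff p x, PySem.List.index?_eq_idxOf?, hix]; rfl
      simp only [hcx, if_true, hgd, hlen]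
      rw [ih (p ++ [x]) (res ++ [(k : Int)]) d ?_]
      · simp [pvRef, hix]
      · intro v
        rw [hd v, pv_idx_append_singleton]
        by_cases hvp : v ∈ p
        · simp [hvp]
        · have hvx : v ≠ x := fun h => hvp (h ▸ hmem)
          simp [hvp, hvx, List.idxOf?_eq_none_iff.mpr hvp]
    | none =>
      have hcx : d.contains x = false := by rw [hc, hix]; rfl
      have hmem : x ∉ p := by
        rw [← PySem.List.index?_eq_none_iff p x, PySem.List.index?_eq_idxOf?]
        exact hix
      simp only [hcx, Bool.false_eq_true, if_false, hlen]
      rw [ih (p ++ [x]) (res ++ [(-1 : Int)]) (d.insert x (p.length : Int)) ?_]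
      · simp [pvRef, hix]
      · intro v
        rw [PySem.Dict.get?_insert, pv_idx_append_singleton]
        by_cases hvx : v = x
        · simp [hvx, hmem]
        · by_cases hvp : v ∈ p
          · simp [hvx, hvp, hd v]
          · simp [hvx, hvp, hd v, List.idxOf?_eq_none_iff.mpr hvp]

-- B's backward table: lookup is the FIRST matching pair of l
theorem pvB_dict (l : List (Int × Int)) (d : PySem.Dict Int Int) (w : Int) :
    ((l.reverse).foldl (fun (d : PySem.Dict Int Int) p => d.insert p.2 p.1) d).getD w 0 =
      match l.find? (fun p => p.2 == w) with
      | some p => p.1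
      | none => d.getD w 0 := by
  rw [List.foldl_reverse]
  induction l with
  | nil => simp
  | cons q l ih =>
    simp only [List.foldr_cons, List.find?_cons]
    by_cases h : q.2 = w
    · simp [h]
    · have hb : (q.2 == w) = false := by simp [h]
      simp only [hb]
      rw [PySem.Dict.getD_insert]
      simp only [ih]
      have hwq : ¬ w = q.2 := fun hh => h hh.symm
      simp [hwq]

theorem pv_find?_enumerate (nums : List Int) (w : Int) :
    ∀ s : Int, (PySem.List.enumerate nums s).find? (fun p => p.2 == w) =
      (List.idxOf? w nums).map (fun k => (s + (k : Int), w)) := by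
  induction nums with
  | nil => intro s; simp [PySem.List.enumerate_nil]
  | cons x xs ih =>
    intro s
    rw [PySem.List.enumerate_cons, List.find?_cons]
    by_cases h : x = w
    · subst h
      have h0 : List.idxOf? x (x :: xs) = some 0 := by
        rw [← PySem.List.index?_eq_idxOf?]
        exact PySem.List.index?_cons_self x xs
      simp [h0]
    · have hb : ((s, x).2 == w) = false := by simp [h]
      have hstep : List.idxOf? w (x :: xs) =
          (List.idxOf? w xs).map (fun k => k + 1) := by
        rw [← PySem.List.index?_eq_idxOf?, ← PySem.List.index?_eq_idxOf?]
        exact PySem.List.index?_cons_of_ne xs h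
      simp only [hb]
      rw [ih (s + 1), hstep]
      cases List.idxOf? w xs with
      | none => rfl
      | some k =>
        have harith : s + 1 + (k : Int) = s + ((k : Nat) + 1 : Nat) := by push_cast; ring
        simp [harith]

-- B's lookup table agrees with the prefix-based reference entry by entry
theorem pvB_inv (nums : List Int) (t : List Int) :
    ∀ p : List Int, nums = p ++ t →
      (PySem.List.enumerate t (p.length : Int)).map
        (fun q =>
          if (((PySem.List.enumerate nums).reverse).foldl
                (fun (d : PySem.Dict Int Int) r => d.insert r.2 r.1)
                PySem.Dict.empty).getD q.2 0 = q.1 then (-1 : Int)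
          else (((PySem.List.enumerate nums).reverse).foldl
                (fun (d : PySem.Dict Int Int) r => d.insert r.2 r.1)
                PySem.Dict.empty).getD q.2 0) = pvRef t p := by
  induction t with
  | nil => intro p _; simp [pvRef, PySem.List.enumerate_nil]
  | cons x xs ih =>
    intro p hnums
    have hget : ∀ w : Int,
        (((PySem.List.enumerate nums).reverse).foldl
          (fun (d : PySem.Dict Int Int) r => d.insert r.2 r.1)
          PySem.Dict.empty).getD w 0 =
        match List.idxOf? w nums with
        | some k => (k : Int)
        | none => 0 := by
      intro w
      rw [pvB_dict, pv_find?_enumerate nums w 0]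
      cases List.idxOf? w nums with
      | none => simp
      | some k => simp
    rw [PySem.List.enumerate_cons, List.map_cons]
    have hmemx : x ∈ nums := by rw [hnums]; simp
    have hhead :
        (if (((PySem.List.enumerate nums).reverse).foldl
              (fun (d : PySem.Dict Int Int) r => d.insert r.2 r.1)
              PySem.Dict.empty).getD x 0 = (p.length : Int) then (-1 : Int)
         else (((PySem.List.enumerate nums).reverse).foldl
              (fun (d : PySem.Dict Int Int) r => d.insert r.2 r.1)
              PySem.Dict.empty).getD x 0) =
        (match List.idxOf? x p with
         | some k => (k : Int)
         | none => (-1 : Int)) := by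
      rw [hget x]
      cases hix : List.idxOf? x p with
      | some k =>
        have hmem : x ∈ p := by
          rw [← PySem.List.index?_isSome_iff p x, PySem.List.index?_eq_idxOf?, hix]; rfl
        have hfull : List.idxOf? x nums = some k := by
          rw [hnums, ← PySem.List.index?_eq_idxOf?,
            PySem.List.index?_append_of_mem (x :: xs) hmem, PySem.List.index?_eq_idxOf?, hix]
        have hklt : k < p.length := pv_idx_lt hix
        have hne : ¬ ((k : Int) = (p.length : Int)) := by omega
        simp [hfull, hne]
      | none =>
        have hmem : x ∉ p := by
          rw [← PySem.List.index?_eq_none_iff p x, PySem.List.index?_eq_idxOf?]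
          exact hix
        have hfull : List.idxOf? x nums = some p.length := by
          have h1 : nums = (p ++ [x]) ++ xs := by simp [hnums]
          rw [h1, ← PySem.List.index?_eq_idxOf?,
            PySem.List.index?_append_of_mem xs (by simp), PySem.List.index?_eq_idxOf?,
            pv_idx_append_singleton]
          simp [hmem]
        simp [hfull]
    have hlen : ((p ++ [x]).length : Int) = (p.length : Int) + 1 := by simp
    have htail := ih (p ++ [x]) (by simp [hnums])
    rw [hlen] at htail
    rw [hhead, htail, pvRef]

-- ===== VERDICT (by name: the statement is the Claim_ definition above) =====
theorem find_left_repeat_num_spec : Claim_equal_find_left_repeat_num := by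
  intro nums _
  unfold Spec_find_left_repeat_num find_left_repeat_num find_left_repeat_num_alt
  have hA := pvA_inv nums [] [] PySem.Dict.empty
    (by intro v; simp [PySem.Dict.get?_empty])
  have hB := pvB_inv nums nums [] (by simp)
  simp only [List.length_nil, Nat.cast_zero] at hA
  rw [hA, List.nil_append]
  simpa using hB.symm
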